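-- pv_equiv track=rewrite | github.com/Neopram/sts1 | backend/app/routers/regional_operations.py | _extract_region_from_location
-- ===== SOURCE A (Python) =====
-- def _extract_region_from_location(location: str) -> str:
--     """Extract region from location string (simplified implementation)"""
--     location_lower = location.lower()
--
--     # Common maritime regions
--     if any(keyword in location_lower for keyword in ['singapore', 'malaysia', 'indonesia', 'thailand']):
--         return "Southeast Asia"
--     elif any(keyword in location_lower for keyword in ['china', 'japan', 'korea', 'taiwan']):
--         return "East Asia"
--     elif any(keyword in location_lower for keyword in ['india', 'sri lanka', 'bangladesh']):
--         return "South Asia"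
--     elif any(keyword in location_lower for keyword in ['middle east', 'oman', 'uae', 'qatar']):
--         return "Middle East"
--     elif any(keyword in location_lower for keyword in ['europe', 'mediterranean', 'atlantic']):
--         return "Europe/Mediterranean"
--     elif any(keyword in location_lower for keyword in ['africa', 'cape town', 'durban']):
--         return "Africa"
--     elif any(keyword in location_lower for keyword in ['america', 'pacific', 'atlantic']):
--         return "Americas"
--     else:
--         return "Global"
-- ===== SOURCE B (Python) =====
-- # Position-driven scanner: walk the lowered string once and, at each position,
-- # test which keywords start there, keeping the minimum-priority hit.
-- _REGION_NAMES = ["Southeast Asia", "East Asia", "South Asia", "Middle East",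
--                  "Europe/Mediterranean", "Africa", "Americas"]
--
-- # keyword -> priority (rule index). 'atlantic' keeps priority 4 only: in the
-- # original chain the Europe/Mediterranean rule always wins it over Americas.
-- _KEYWORDS = {
--     'singapore': 0, 'malaysia': 0, 'indonesia': 0, 'thailand': 0,
--     'china': 1, 'japan': 1, 'korea': 1, 'taiwan': 1,
--     'india': 2, 'sri lanka': 2, 'bangladesh': 2,
--     'middle east': 3, 'oman': 3, 'uae': 3, 'qatar': 3,
--     'europe': 4, 'mediterranean': 4, 'atlantic': 4,
--     'africa': 5, 'cape town': 5, 'durban': 5,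
--     'america': 6, 'pacific': 6,
-- }
--
-- def _extract_region_from_location(location: str) -> str:
--     s = location.lower()
--     best = len(_REGION_NAMES)
--     for i in range(len(s)):
--         for kw, pr in _KEYWORDS.items():
--             if pr < best and s.startswith(kw, i):
--                 best = pr
--     return _REGION_NAMES[best] if best < len(_REGION_NAMES) else "Global"
-- ===== Notes on version B (the rewrite author's own statement) =====
-- stated objective: alternative
-- what changed: Replaces the ordered if/elif rule scan (each rule running substring searches over the whole string) by a single left-to-right walk over the text positions that tests which keywords start at each position and accumulates the minimum-priority hit, indexing the region table by that priority; 'atlantic' is assigned priority 4 only since the original chain always resolves it to Europe/Mediterranean.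
import Mathlib
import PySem

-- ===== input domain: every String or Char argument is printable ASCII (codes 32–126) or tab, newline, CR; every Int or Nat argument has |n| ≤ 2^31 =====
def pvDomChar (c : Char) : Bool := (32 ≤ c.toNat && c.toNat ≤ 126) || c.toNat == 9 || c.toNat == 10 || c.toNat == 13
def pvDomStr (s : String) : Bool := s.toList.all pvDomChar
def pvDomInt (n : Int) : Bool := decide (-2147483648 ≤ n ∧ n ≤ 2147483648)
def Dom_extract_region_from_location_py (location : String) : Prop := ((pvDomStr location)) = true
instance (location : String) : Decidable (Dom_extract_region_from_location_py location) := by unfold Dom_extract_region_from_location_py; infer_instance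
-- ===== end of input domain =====

-- B replaces the ordered if/elif keyword scan by a single left-to-right walk over the text
-- positions that keeps the minimum-priority keyword hit (return value only; alternative algorithm).

-- ===== PORT A =====
def extract_region_from_location_py (location : String) : String :=
  let location_lower := PySem.Str.lower location
  if (["singapore", "malaysia", "indonesia", "thailand"].any fun k => PySem.Str.isIn k location_lower) then "Southeast Asia"
  else if (["china", "japan", "korea", "taiwan"].any fun k => PySem.Str.isIn k location_lower) then "East Asia"
  else if (["india", "sri lanka", "bangladesh"].any fun k => PySem.Str.isIn k location_lower) then "South Asia"
  else if (["middle east", "oman", "uae", "qatar"].any fun k => PySem.Str.isIn k location_lower) then "Middle East"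
  else if (["europe", "mediterranean", "atlantic"].any fun k => PySem.Str.isIn k location_lower) then "Europe/Mediterranean"
  else if (["africa", "cape town", "durban"].any fun k => PySem.Str.isIn k location_lower) then "Africa"
  else if (["america", "pacific", "atlantic"].any fun k => PySem.Str.isIn k location_lower) then "Americas"
  else "Global"

-- ===== PORT B =====
def pvREGION_NAMES : List String :=
  ["Southeast Asia", "East Asia", "South Asia", "Middle East",
   "Europe/Mediterranean", "Africa", "Americas"]

def pvKEYWORDS : List (String × Nat) :=
  [("singapore", 0), ("malaysia", 0), ("indonesia", 0), ("thailand", 0),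
   ("china", 1), ("japan", 1), ("korea", 1), ("taiwan", 1),
   ("india", 2), ("sri lanka", 2), ("bangladesh", 2),
   ("middle east", 3), ("oman", 3), ("uae", 3), ("qatar", 3),
   ("europe", 4), ("mediterranean", 4), ("atlantic", 4),
   ("africa", 5), ("cape town", 5), ("durban", 5),
   ("america", 6), ("pacific", 6)]

-- inner loop of Source B: scan the keyword table at one text position i
-- (s.startswith(kw, i) is ported as startswith on s.drop i; exact since 0 ≤ i < len s)
def pvInner (s : List Char) (i : Nat) (L : List (String × Nat)) (best : Nat) : Nat :=
  L.foldl (fun best kp =>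
    if kp.2 < best ∧ PySem.Chars.startswith (s.drop i) kp.1.toList = true then kp.2 else best) best

-- outer loop of Source B: walk the positions, accumulating the minimum-priority hit
def pvBest (s : List Char) (I : List Nat) (best : Nat) : Nat :=
  I.foldl (fun best i => pvInner s i pvKEYWORDS best) best

def extract_region_from_location_py_alt (location : String) : String :=
  let s := PySem.Chars.lower location.toList
  let best := pvBest s (List.range s.length) pvREGION_NAMES.length
  if best < pvREGION_NAMES.length then (PySem.List.pyGet? pvREGION_NAMES (best : Int)).getD "Global"
  else "Global"

-- ===== PRECONDITION & SPEC =====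
def Spec_extract_region_from_location_py (location : String) (out : String) : Prop := out = extract_region_from_location_py_alt location
instance (location : String) (out : String) : Decidable (Spec_extract_region_from_location_py location out) := by unfold Spec_extract_region_from_location_py; infer_instance

-- ===== CLAIM (what is proved, stated in full; the proofs are below) =====
def Claim_equal_extract_region_from_location_py : Prop := ∀ (location : String), Dom_extract_region_from_location_py location → Spec_extract_region_from_location_py location (extract_region_from_location_py location)

-- ===== LEMMAS AND PROOFS =====

def pvM (s : List Char) (kw : String) : Prop := PySem.Chars.isIn kw.toList s = true

lemma pvInner_spec (s : List Char) (i : Nat) :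
    ∀ (L : List (String × Nat)) (b : Nat),
      (pvInner s i L b = b ∨ ∃ kp ∈ L, PySem.Chars.startswith (s.drop i) kp.1.toList = true ∧ kp.2 = pvInner s i L b)
      ∧ pvInner s i L b ≤ b
      ∧ ∀ kp ∈ L, PySem.Chars.startswith (s.drop i) kp.1.toList = true → pvInner s i L b ≤ kp.2 := by
  intro L
  induction L with
  | nil => simp [pvInner]
  | cons a L ih =>
    intro b
    obtain ⟨ih1, ih2, ih3⟩ := ih (if a.2 < b ∧ PySem.Chars.startswith (s.drop i) a.1.toList = true then a.2 else b)
    have hstep : pvInner s i (a :: L) b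
        = pvInner s i L (if a.2 < b ∧ PySem.Chars.startswith (s.drop i) a.1.toList = true then a.2 else b) := by
      simp [pvInner]
    rw [hstep]
    by_cases h : a.2 < b ∧ PySem.Chars.startswith (s.drop i) a.1.toList = true
    · simp only [if_pos h] at ih1 ih2 ih3 ⊢
      refine ⟨?_, by omega, ?_⟩
      · rcases ih1 with h1 | ⟨kp, hkp, hsw, hv⟩
        · exact Or.inr ⟨a, List.mem_cons_self .., h.2, h1.symm⟩
        · exact Or.inr ⟨kp, List.mem_cons_of_mem _ hkp, hsw, hv⟩
      · intro kp hkp hsw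
        rcases List.mem_cons.mp hkp with rfl | hkp
        · omega
        · exact ih3 kp hkp hsw
    · simp only [if_neg h] at ih1 ih2 ih3 ⊢
      refine ⟨?_, ih2, ?_⟩
      · rcases ih1 with h1 | ⟨kp, hkp, hsw, hv⟩
        · exact Or.inl h1
        · exact Or.inr ⟨kp, List.mem_cons_of_mem _ hkp, hsw, hv⟩
      · intro kp hkp hsw
        rcases List.mem_cons.mp hkp with rfl | hkp
        · have : ¬ kp.2 < b := fun hlt => h ⟨hlt, hsw⟩
          omega
        · exact ih3 kp hkp hsw

lemma pvBest_spec (s : List Char) :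
    ∀ (I : List Nat) (b : Nat),
      (pvBest s I b = b ∨ ∃ i ∈ I, ∃ kp ∈ pvKEYWORDS, PySem.Chars.startswith (s.drop i) kp.1.toList = true ∧ kp.2 = pvBest s I b)
      ∧ pvBest s I b ≤ b
      ∧ ∀ i ∈ I, ∀ kp ∈ pvKEYWORDS, PySem.Chars.startswith (s.drop i) kp.1.toList = true → pvBest s I b ≤ kp.2 := by
  intro I
  induction I with
  | nil => simp [pvBest]
  | cons j I ih =>
    intro b
    obtain ⟨ih1, ih2, ih3⟩ := ih (pvInner s j pvKEYWORDS b)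
    obtain ⟨in1, in2, in3⟩ := pvInner_spec s j pvKEYWORDS b
    have hstep : pvBest s (j :: I) b = pvBest s I (pvInner s j pvKEYWORDS b) := by
      simp [pvBest]
    rw [hstep]
    refine ⟨?_, le_trans ih2 in2, ?_⟩
    · rcases ih1 with h1 | ⟨i, hi, kp, hkp, hsw, hv⟩
      · rw [h1]
        rcases in1 with h2 | ⟨kp, hkp, hsw, hv⟩
        · exact Or.inl h2
        · exact Or.inr ⟨j, List.mem_cons_self .., kp, hkp, hsw, hv⟩
      · exact Or.inr ⟨i, List.mem_cons_of_mem _ hi, kp, hkp, hsw, hv⟩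
    · intro i hi kp hkp hsw
      rcases List.mem_cons.mp hi with rfl | hi
      · exact le_trans ih2 (in3 kp hkp hsw)
      · exact ih3 i hi kp hkp hsw

-- a nonempty keyword occurs as a substring iff it starts at some position < length
lemma pv_occ_iff (s kw : List Char) (hk : kw ≠ []) :
    (∃ i, i < s.length ∧ PySem.Chars.startswith (s.drop i) kw = true) ↔ PySem.Chars.isIn kw s = true := by
  rw [← PySem.Chars.exists_prefix_drop_iff_isIn]
  constructor
  · rintro ⟨i, _, hsw⟩
    exact ⟨i, (PySem.Chars.startswith_iff _ _).mp hsw⟩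
  · rintro ⟨j, hj⟩
    by_cases hjl : j < s.length
    · exact ⟨j, hjl, (PySem.Chars.startswith_iff _ _).mpr hj⟩
    · exfalso
      rw [List.drop_of_length_le (by omega)] at hj
      exact hk (List.prefix_nil.mp hj)

-- the seven rule conditions, with B's keyword sets ('atlantic' only in rule 4)
def pvC0 (s : List Char) : Prop := pvM s "singapore" ∨ pvM s "malaysia" ∨ pvM s "indonesia" ∨ pvM s "thailand"
def pvC1 (s : List Char) : Prop := pvM s "china" ∨ pvM s "japan" ∨ pvM s "korea" ∨ pvM s "taiwan"
def pvC2 (s : List Char) : Prop := pvM s "india" ∨ pvM s "sri lanka" ∨ pvM s "bangladesh"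
def pvC3 (s : List Char) : Prop := pvM s "middle east" ∨ pvM s "oman" ∨ pvM s "uae" ∨ pvM s "qatar"
def pvC4 (s : List Char) : Prop := pvM s "europe" ∨ pvM s "mediterranean" ∨ pvM s "atlantic"
def pvC5 (s : List Char) : Prop := pvM s "africa" ∨ pvM s "cape town" ∨ pvM s "durban"
def pvC6 (s : List Char) : Prop := pvM s "america" ∨ pvM s "pacific"

-- the full characterisation of Source B's accumulator, in rule-level terms
lemma pvBest_char (s : List Char) :
    (pvBest s (List.range s.length) 7 = 7
      ∨ (pvBest s (List.range s.length) 7 = 0 ∧ pvC0 s)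
      ∨ (pvBest s (List.range s.length) 7 = 1 ∧ pvC1 s)
      ∨ (pvBest s (List.range s.length) 7 = 2 ∧ pvC2 s)
      ∨ (pvBest s (List.range s.length) 7 = 3 ∧ pvC3 s)
      ∨ (pvBest s (List.range s.length) 7 = 4 ∧ pvC4 s)
      ∨ (pvBest s (List.range s.length) 7 = 5 ∧ pvC5 s)
      ∨ (pvBest s (List.range s.length) 7 = 6 ∧ pvC6 s))
    ∧ (pvC0 s → pvBest s (List.range s.length) 7 ≤ 0)
    ∧ (pvC1 s → pvBest s (List.range s.length) 7 ≤ 1)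
    ∧ (pvC2 s → pvBest s (List.range s.length) 7 ≤ 2)
    ∧ (pvC3 s → pvBest s (List.range s.length) 7 ≤ 3)
    ∧ (pvC4 s → pvBest s (List.range s.length) 7 ≤ 4)
    ∧ (pvC5 s → pvBest s (List.range s.length) 7 ≤ 5)
    ∧ (pvC6 s → pvBest s (List.range s.length) 7 ≤ 6) := by
  obtain ⟨H1, _, H2⟩ := pvBest_spec s (List.range s.length) 7
  have hub : ∀ kp ∈ pvKEYWORDS, pvM s kp.1 → pvBest s (List.range s.length) 7 ≤ kp.2 := by
    intro kp hkp hm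
    have hne : kp.1.toList ≠ [] := by
      simp only [pvKEYWORDS, List.mem_cons, List.not_mem_nil, or_false] at hkp
      rcases hkp with rfl|rfl|rfl|rfl|rfl|rfl|rfl|rfl|rfl|rfl|rfl|rfl|rfl|rfl|rfl|rfl|rfl|rfl|rfl|rfl|rfl|rfl|rfl <;> decide
    obtain ⟨i, hi, hsw⟩ := (pv_occ_iff s kp.1.toList hne).mpr hm
    exact H2 i (List.mem_range.mpr hi) kp hkp hsw
  refine ⟨?_, ?_, ?_, ?_, ?_, ?_, ?_, ?_⟩
  · rcases H1 with h7 | ⟨i, hi, kp, hkp, hsw, hv⟩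
    · exact Or.inl h7
    · have hm : pvM s kp.1 := (pv_occ_iff s kp.1.toList (by
        simp only [pvKEYWORDS, List.mem_cons, List.not_mem_nil, or_false] at hkp
        rcases hkp with rfl|rfl|rfl|rfl|rfl|rfl|rfl|rfl|rfl|rfl|rfl|rfl|rfl|rfl|rfl|rfl|rfl|rfl|rfl|rfl|rfl|rfl|rfl <;> decide)).mp
        ⟨i, List.mem_range.mp hi, hsw⟩
      simp only [pvKEYWORDS, List.mem_cons, List.not_mem_nil, or_false] at hkp
      rcases hkp with rfl|rfl|rfl|rfl|rfl|rfl|rfl|rfl|rfl|rfl|rfl|rfl|rfl|rfl|rfl|rfl|rfl|rfl|rfl|rfl|rfl|rfl|rfl <;>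
        simp only at hm hv <;>
        simp [pvC0, pvC1, pvC2, pvC3, pvC4, pvC5, pvC6, hm, ← hv]
  · rintro (h|h|h|h)
    · exact hub ("singapore", 0) (by simp [pvKEYWORDS]) h
    · exact hub ("malaysia", 0) (by simp [pvKEYWORDS]) h
    · exact hub ("indonesia", 0) (by simp [pvKEYWORDS]) h
    · exact hub ("thailand", 0) (by simp [pvKEYWORDS]) h
  · rintro (h|h|h|h)
    · exact hub ("china", 1) (by simp [pvKEYWORDS]) h
    · exact hub ("japan", 1) (by simp [pvKEYWORDS]) h
    · exact hub ("korea", 1) (by simp [pvKEYWORDS]) h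
    · exact hub ("taiwan", 1) (by simp [pvKEYWORDS]) h
  · rintro (h|h|h)
    · exact hub ("india", 2) (by simp [pvKEYWORDS]) h
    · exact hub ("sri lanka", 2) (by simp [pvKEYWORDS]) h
    · exact hub ("bangladesh", 2) (by simp [pvKEYWORDS]) h
  · rintro (h|h|h|h)
    · exact hub ("middle east", 3) (by simp [pvKEYWORDS]) h
    · exact hub ("oman", 3) (by simp [pvKEYWORDS]) h
    · exact hub ("uae", 3) (by simp [pvKEYWORDS]) h
    · exact hub ("qatar", 3) (by simp [pvKEYWORDS]) h
  · rintro (h|h|h)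
    · exact hub ("europe", 4) (by simp [pvKEYWORDS]) h
    · exact hub ("mediterranean", 4) (by simp [pvKEYWORDS]) h
    · exact hub ("atlantic", 4) (by simp [pvKEYWORDS]) h
  · rintro (h|h|h)
    · exact hub ("africa", 5) (by simp [pvKEYWORDS]) h
    · exact hub ("cape town", 5) (by simp [pvKEYWORDS]) h
    · exact hub ("durban", 5) (by simp [pvKEYWORDS]) h
  · rintro (h|h)
    · exact hub ("america", 6) (by simp [pvKEYWORDS]) h
    · exact hub ("pacific", 6) (by simp [pvKEYWORDS]) h

-- ===== VERDICT (by name: the statement is the Claim_ definition above) =====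
set_option maxHeartbeats 2000000 in
theorem extract_region_from_location_py_spec : Claim_equal_extract_region_from_location_py := by
  intro location _
  unfold Spec_extract_region_from_location_py extract_region_from_location_py
  simp only [List.any_cons, List.any_nil, Bool.or_eq_true, Bool.false_eq_true, or_false,
    PySem.Str.isIn_eq, PySem.Str.toList_lower]
  set s := PySem.Chars.lower location.toList with hs
  have hB := pvBest_char s
  simp only [pvC0, pvC1, pvC2, pvC3, pvC4, pvC5, pvC6, pvM] at hB
  obtain ⟨H1, h0', h1', h2', h3', h4', h5', h6'⟩ := hB
  have halt : extract_region_from_location_py_alt location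
      = (if pvBest s (List.range s.length) 7 < 7
         then (PySem.List.pyGet? pvREGION_NAMES ((pvBest s (List.range s.length) 7 : Nat) : Int)).getD "Global"
         else "Global") := by
    simp only [extract_region_from_location_py_alt, ← hs]
    norm_num [pvREGION_NAMES]
  split_ifs with h0 h1 h2 h3 h4 h5 h6
  · have := h0' h0
    have he : pvBest s (List.range s.length) 7 = 0 := by omega
    rw [halt, he]; decide
  · have := h1' h1
    have he : pvBest s (List.range s.length) 7 = 1 := by
      rcases H1 with h|⟨h,hc⟩|⟨h,hc⟩|⟨h,hc⟩|⟨h,hc⟩|⟨h,hc⟩|⟨h,hc⟩|⟨h,hc⟩ <;> first | omega | exact absurd hc h0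
    rw [halt, he]; decide
  · have := h2' h2
    have he : pvBest s (List.range s.length) 7 = 2 := by
      rcases H1 with h|⟨h,hc⟩|⟨h,hc⟩|⟨h,hc⟩|⟨h,hc⟩|⟨h,hc⟩|⟨h,hc⟩|⟨h,hc⟩ <;>
        first | omega | exact absurd hc h0 | exact absurd hc h1
    rw [halt, he]; decide
  · have := h3' h3
    have he : pvBest s (List.range s.length) 7 = 3 := by
      rcases H1 with h|⟨h,hc⟩|⟨h,hc⟩|⟨h,hc⟩|⟨h,hc⟩|⟨h,hc⟩|⟨h,hc⟩|⟨h,hc⟩ <;>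
        first | omega | exact absurd hc h0 | exact absurd hc h1 | exact absurd hc h2
    rw [halt, he]; decide
  · have := h4' h4
    have he : pvBest s (List.range s.length) 7 = 4 := by
      rcases H1 with h|⟨h,hc⟩|⟨h,hc⟩|⟨h,hc⟩|⟨h,hc⟩|⟨h,hc⟩|⟨h,hc⟩|⟨h,hc⟩ <;>
        first | omega | exact absurd hc h0 | exact absurd hc h1 | exact absurd hc h2 | exact absurd hc h3
    rw [halt, he]; decide
  · have := h5' h5
    have he : pvBest s (List.range s.length) 7 = 5 := by
      rcases H1 with h|⟨h,hc⟩|⟨h,hc⟩|⟨h,hc⟩|⟨h,hc⟩|⟨h,hc⟩|⟨h,hc⟩|⟨h,hc⟩ <;>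
        first | omega | exact absurd hc h0 | exact absurd hc h1 | exact absurd hc h2 | exact absurd hc h3 | exact absurd hc h4
    rw [halt, he]; decide
  · -- Americas: h6 is america ∨ pacific ∨ atlantic, but atlantic is impossible given ¬h4
    have h6'' : PySem.Chars.isIn "america".toList s = true ∨ PySem.Chars.isIn "pacific".toList s = true := by
      rcases h6 with h|h|h
      · exact Or.inl h
      · exact Or.inr h
      · exact absurd (Or.inr (Or.inr h)) h4
    have := h6' h6''
    have he : pvBest s (List.range s.length) 7 = 6 := by
      rcases H1 with h|⟨h,hc⟩|⟨h,hc⟩|⟨h,hc⟩|⟨h,hc⟩|⟨h,hc⟩|⟨h,hc⟩|⟨h,hc⟩ <;>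
        first | omega | exact absurd hc h0 | exact absurd hc h1 | exact absurd hc h2 | exact absurd hc h3 | exact absurd hc h4 | exact absurd hc h5
    rw [halt, he]; decide
  · have he : pvBest s (List.range s.length) 7 = 7 := by
      rcases H1 with h|⟨h,hc⟩|⟨h,hc⟩|⟨h,hc⟩|⟨h,hc⟩|⟨h,hc⟩|⟨h,hc⟩|⟨h,hc⟩ <;>
        first | omega | exact absurd hc h0 | exact absurd hc h1 | exact absurd hc h2 | exact absurd hc h3 | exact absurd hc h4 | exact absurd hc h5 | exact hc.elim (fun h => absurd (Or.inl h) h6) (fun h => absurd (Or.inr (Or.inl h)) h6)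
    rw [halt, he]; decide
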